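-- pv_equiv track=rewrite | github.com/xiaovhua/leetcode | 栈/1111_有效括号的嵌套深度.py | maxDepthAfterSplit2
-- ===== SOURCE A (Python) =====
-- def maxDepthAfterSplit2(seq):
--     depth = 0 # 总 depth，保证均匀分给两个序列
--     ans = []
--     for c in seq:
--         if c == "(": # 先给 0，然后为基数则给 1，为偶数则给 0，保证分配均匀
--             ans.append(depth%2)
--             depth += 1
--         else:
--             depth -= 1 # 同样的道理，但是要和上面相反：要么上面先加下面后减，要么上面后加下面先减，保证分配给最新添加的'('括号中
--             ans.append(depth%2)
--     return ans
-- ===== SOURCE B (Python) =====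
-- def maxDepthAfterSplit2(seq):
--     # Closed form: the depth before position i always has the parity of i
--     # (opens - closes == opens + closes == i (mod 2)), so no depth counter is
--     # needed: '(' at index i gets i % 2, any other char gets (i + 1) % 2.
--     return [(i + (c != "(")) % 2 for i, c in enumerate(seq)]
-- ===== Notes on version B (the rewrite author's own statement) =====
-- stated objective: alternative
-- what changed: Replaces the stateful depth-counter loop with a closed-form map: since the depth before position i always has the parity of i (opens-closes = opens+closes = i mod 2), each character's color is computed directly from its index parity with no running counter.
import Mathlib
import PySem

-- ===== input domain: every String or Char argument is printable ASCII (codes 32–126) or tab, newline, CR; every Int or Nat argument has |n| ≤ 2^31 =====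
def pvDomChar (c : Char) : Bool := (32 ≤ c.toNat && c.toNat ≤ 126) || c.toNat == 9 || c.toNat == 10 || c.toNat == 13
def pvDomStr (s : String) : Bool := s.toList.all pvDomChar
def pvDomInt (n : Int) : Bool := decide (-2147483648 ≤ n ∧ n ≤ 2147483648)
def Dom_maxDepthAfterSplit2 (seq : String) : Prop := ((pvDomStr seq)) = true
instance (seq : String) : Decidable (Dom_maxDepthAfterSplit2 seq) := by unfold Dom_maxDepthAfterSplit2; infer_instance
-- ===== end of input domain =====

-- B drops A's running depth counter entirely: the color of each character is a closed form of its index parity (alternative, same cost).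
-- ===== PORT A =====
def pvStepA (st : Int × List Int) (c : Char) : Int × List Int :=
  if c = '(' then (st.1 + 1, st.2 ++ [PySem.Int.mod st.1 2])
  else (st.1 - 1, st.2 ++ [PySem.Int.mod (st.1 - 1) 2])

def maxDepthAfterSplit2 (seq : String) : List Int :=
  (seq.toList.foldl pvStepA (0, [])).2

-- ===== PORT B =====
def maxDepthAfterSplit2_alt (seq : String) : List Int :=
  (PySem.List.enumerate seq.toList).map
    (fun p => PySem.Int.mod (p.1 + (if p.2 = '(' then 0 else 1)) 2)

-- ===== PRECONDITION & SPEC =====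
def Spec_maxDepthAfterSplit2 (seq : String) (out : List Int) : Prop := out = maxDepthAfterSplit2_alt seq
instance (seq : String) (out : List Int) : Decidable (Spec_maxDepthAfterSplit2 seq out) := by unfold Spec_maxDepthAfterSplit2; infer_instance

-- ===== CLAIM =====
def Claim_equal_maxDepthAfterSplit2 : Prop := ∀ (seq : String), Dom_maxDepthAfterSplit2 seq → Spec_maxDepthAfterSplit2 seq (maxDepthAfterSplit2 seq)

-- ===== LEMMAS AND PROOFS =====

theorem pv_mod2_congr (x y : Int) (h : (x - y) % 2 = 0) :
    PySem.Int.mod x 2 = PySem.Int.mod y 2 := by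
  rw [PySem.Int.mod_eq_emod_of_pos (a := x) (by norm_num),
      PySem.Int.mod_eq_emod_of_pos (a := y) (by norm_num)]
  omega

theorem pvStepA_open (st : Int × List Int) :
    pvStepA st '(' = (st.1 + 1, st.2 ++ [PySem.Int.mod st.1 2]) := by
  simp [pvStepA]

theorem pvStepA_close (c : Char) (h : ¬ c = '(') (st : Int × List Int) :
    pvStepA st c = (st.1 - 1, st.2 ++ [PySem.Int.mod (st.1 - 1) 2]) := by
  simp [pvStepA, h]

theorem pv_fold_eq (cs : List Char) : ∀ (d s : Int) (acc : List Int),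
    (d - s) % 2 = 0 →
    (cs.foldl pvStepA (d, acc)).2 =
      acc ++ (PySem.List.enumerate cs s).map
        (fun p => PySem.Int.mod (p.1 + (if p.2 = '(' then 0 else 1)) 2) := by
  induction cs with
  | nil => intro d s acc _; simp [PySem.List.enumerate_nil]
  | cons c cs ih =>
    intro d s acc h
    by_cases hc : c = '('
    · subst hc
      rw [List.foldl_cons, pvStepA_open, ih (d + 1) (s + 1) _ (by omega),
          PySem.List.enumerate_cons, List.map_cons]
      rw [pv_mod2_congr d (s + 0) (by omega)]
      simp
    · rw [List.foldl_cons, pvStepA_close c hc, ih (d - 1) (s + 1) _ (by omega),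
          PySem.List.enumerate_cons, List.map_cons]
      rw [pv_mod2_congr (d - 1) (s + if c = '(' then 0 else 1) (by simp [hc]; omega)]
      simp

-- ===== VERDICT =====
theorem maxDepthAfterSplit2_spec : Claim_equal_maxDepthAfterSplit2 := by
  intro seq _
  show maxDepthAfterSplit2 seq = maxDepthAfterSplit2_alt seq
  rw [maxDepthAfterSplit2, maxDepthAfterSplit2_alt,
      pv_fold_eq seq.toList 0 0 [] (by norm_num), List.nil_append]
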